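-- pv_equiv track=rewrite | github.com/MaferMazu/analyzer-syntactic-for-operator-grammar | analyzer.py | _verify_not_double_no_terminal
-- ===== SOURCE A (Python) =====
-- def _verify_not_double_no_terminal(rest):
--     """
--     Verify not double no terminal
--     :param rest:
--     :return:
--     """
--     prev_no_terminal = False
--     for elem in rest:
--         if elem.isupper() and not prev_no_terminal:
--             prev_no_terminal = True
--         elif not elem.isupper():
--             prev_no_terminal = False
--         else:
--             return False
--     return True
-- ===== SOURCE B (Python) =====
-- def _verify_not_double_no_terminal(rest):
--     """
--     Verify not double no terminal
--     :param rest: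
--     :return:
--     """
--     mask = ''.join('U' if elem.isupper() else '.' for elem in rest)
--     return 'UU' not in mask
-- ===== Notes on version B (the rewrite author's own statement) =====
-- stated objective: alternative
-- what changed: Replaces the running prev_no_terminal flag loop with a staged algorithm: first encode the list as a flag string ('U' per uppercase element), then decide the result with a single substring search for 'UU'.
import Mathlib
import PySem

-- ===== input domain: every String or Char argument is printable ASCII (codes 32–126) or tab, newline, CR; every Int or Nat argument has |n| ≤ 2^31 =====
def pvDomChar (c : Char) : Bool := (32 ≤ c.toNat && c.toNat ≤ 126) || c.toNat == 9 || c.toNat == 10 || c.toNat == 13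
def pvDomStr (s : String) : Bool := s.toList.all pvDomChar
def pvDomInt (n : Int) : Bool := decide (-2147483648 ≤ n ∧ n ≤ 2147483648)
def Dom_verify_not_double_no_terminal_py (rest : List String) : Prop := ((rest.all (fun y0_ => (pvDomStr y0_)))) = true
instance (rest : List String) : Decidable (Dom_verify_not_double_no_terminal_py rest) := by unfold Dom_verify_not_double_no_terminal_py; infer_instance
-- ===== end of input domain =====

-- B replaces A's running prev_no_terminal flag loop with a staged algorithm: encode the
-- list as a flag string, then one substring search for "UU"; objective: alternative.

-- str.isupper(): at least one cased char and no lowercase char (exact on the ASCII domain)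
def pvStrIsupper (s : String) : Bool :=
  s.toList.any (fun c => PySem.Chars.isupper c || PySem.Chars.islower c) &&
  s.toList.all (fun c => !PySem.Chars.islower c)

-- ===== PORT A =====
def verify_not_double_no_terminal_loop (prev_no_terminal : Bool) : List String → Bool
  | [] => true
  | elem :: rest =>
    if pvStrIsupper elem && !prev_no_terminal then
      verify_not_double_no_terminal_loop true rest
    else if !(pvStrIsupper elem) then
      verify_not_double_no_terminal_loop false rest
    else
      false

def verify_not_double_no_terminal_py (rest : List String) : Bool :=
  verify_not_double_no_terminal_loop false rest

-- ===== PORT B =====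
def verify_not_double_no_terminal_py_alt (rest : List String) : Bool :=
  let mask := PySem.Str.join "" (rest.map (fun elem => if pvStrIsupper elem then "U" else "."))
  !(PySem.Str.isIn "UU" mask)

-- ===== PRECONDITION & SPEC =====
def Spec_verify_not_double_no_terminal_py (rest : List String) (out : Bool) : Prop := out = verify_not_double_no_terminal_py_alt rest
instance (rest : List String) (out : Bool) : Decidable (Spec_verify_not_double_no_terminal_py rest out) := by unfold Spec_verify_not_double_no_terminal_py; infer_instance

-- ===== CLAIM (what is proved, stated in full; the proofs are below) =====
def Claim_equal_verify_not_double_no_terminal_py : Prop := ∀ (rest : List String), Dom_verify_not_double_no_terminal_py rest → Spec_verify_not_double_no_terminal_py rest (verify_not_double_no_terminal_py rest)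

-- ===== LEMMAS AND PROOFS =====

-- the flag list B's mask is built from
def pvMask (l : List String) : List Char :=
  l.map (fun elem => if pvStrIsupper elem then 'U' else '.')

-- head-is-uppercase test of a list (false on [])
def pvHeadUpper : List String → Bool
  | [] => false
  | e :: _ => pvStrIsupper e

theorem pvMask_cons (e : String) (r : List String) :
    pvMask (e :: r) = (if pvStrIsupper e then 'U' else '.') :: pvMask r := rfl

theorem pvHeadUpper_cons (e : String) (r : List String) :
    pvHeadUpper (e :: r) = pvStrIsupper e := rfl

theorem pvMask_head (r : List String) :
    ((pvMask r).head? = some 'U') ↔ pvHeadUpper r = true := by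
  cases r with
  | nil => simp [pvMask, pvHeadUpper]
  | cons f r' =>
    simp only [pvMask, List.map_cons, List.head?_cons, Option.some.injEq, pvHeadUpper]
    by_cases h : pvStrIsupper f = true <;> simp [h]

theorem prefix_singleton_iff_head (b : Char) (cs : List Char) :
    [b] <+: cs ↔ cs.head? = some b := by
  cases cs with
  | nil => simp
  | cons d ds => rw [List.cons_prefix_cons]; simp [eq_comm]

theorem infix_UU_cons (c : Char) (cs : List Char) :
    ['U', 'U'] <:+: (c :: cs) ↔ (c = 'U' ∧ cs.head? = some 'U') ∨ ['U', 'U'] <:+: cs := by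
  rw [List.infix_cons_iff, List.cons_prefix_cons, prefix_singleton_iff_head]
  constructor
  · rintro (⟨h1, h2⟩ | h)
    · exact Or.inl ⟨h1.symm, h2⟩
    · exact Or.inr h
  · rintro (⟨h1, h2⟩ | h)
    · exact Or.inl ⟨h1.symm, h2⟩
    · exact Or.inr h

theorem loop_eq (l : List String) : ∀ prev : Bool,
    verify_not_double_no_terminal_loop prev l =
      !((prev && pvHeadUpper l) || decide (['U', 'U'] <:+: pvMask l)) := by
  induction l with
  | nil =>
    intro prev
    simp [verify_not_double_no_terminal_loop, pvHeadUpper, pvMask, List.infix_nil]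
  | cons e r ih =>
    intro prev
    have hcons : decide (['U', 'U'] <:+: pvMask (e :: r)) =
        ((pvStrIsupper e && pvHeadUpper r) || decide (['U', 'U'] <:+: pvMask r)) := by
      rw [pvMask_cons, Bool.eq_iff_iff]
      simp only [decide_eq_true_iff, Bool.or_eq_true, Bool.and_eq_true]
      rw [infix_UU_cons]
      by_cases hu : pvStrIsupper e = true
      · simp [hu, pvMask_head]
      · simp only [Bool.not_eq_true] at hu
        simp [hu]
    simp only [verify_not_double_no_terminal_loop, pvHeadUpper_cons, hcons]
    by_cases hu : pvStrIsupper e = true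
    · cases prev with
      | false => simp [hu, ih]
      | true => simp [hu]
    · simp only [Bool.not_eq_true] at hu
      simp [hu, ih]

theorem mask_toList (l : List String) :
    (PySem.Str.join "" (l.map (fun elem => if pvStrIsupper elem then "U" else "."))).toList
      = pvMask l := by
  rw [PySem.Str.toList_join]
  have h : (l.map (fun elem => if pvStrIsupper elem then "U" else ".")).map String.toList
      = (pvMask l).map ([·]) := by
    simp only [List.map_map, pvMask]
    refine List.map_congr_left (fun e _ => ?_)
    by_cases hu : pvStrIsupper e = true <;> simp [hu]
  simp only [String.toList_empty] at h ⊢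
  rw [h, PySem.Chars.join_nil_singletons]

-- ===== VERDICT (by name: the statement is the Claim_ definition above) =====
theorem verify_not_double_no_terminal_py_spec : Claim_equal_verify_not_double_no_terminal_py := by
  intro rest _
  show verify_not_double_no_terminal_py rest = verify_not_double_no_terminal_py_alt rest
  have h := PySem.Str.isIn_iff_infix "UU"
    (PySem.Str.join "" (rest.map (fun elem => if pvStrIsupper elem then "U" else ".")))
  rw [mask_toList, show "UU".toList = ['U', 'U'] from rfl] at h
  have hIn : PySem.Str.isIn "UU"
      (PySem.Str.join "" (rest.map (fun elem => if pvStrIsupper elem then "U" else ".")))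
      = decide (['U', 'U'] <:+: pvMask rest) := by
    rw [Bool.eq_iff_iff, decide_eq_true_iff]
    exact h
  rw [verify_not_double_no_terminal_py, loop_eq]
  simp only [verify_not_double_no_terminal_py_alt, hIn, pvHeadUpper]
  simp
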